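-- pv_equiv track=rewrite | github.com/lasersphere/Tilda | Tilda/PolliFit/AliveTools.py | find_ref_files
-- ===== SOURCE A (Python) =====
-- def find_ref_files(file, all_files, ref_str):
--     """
--     this will search for the previous and the next reference measurement for a given HV measurement file.
--     :param file: HV measurement file.
--     :param all_files: A list of all files.
--     :param ref_str: The reference str.
--     :return: ref_files.
--     """
--     i = 0
--     j = 0
--     ref_files = []
--     for element in all_files:
--         if element == file:
--             i = 1
--
--         if ref_str in element['type']:
--             if i == 0:
--                 ref_files = [element]
--             if i == 1:
--                 if j == 0:
--                     ref_files = ref_files + [element]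
--                     j = 1
--     return ref_files
-- ===== SOURCE B (Python) =====
-- def find_ref_files(file, all_files, ref_str):
--     """Different decomposition: locate the split index of `file`, take the last
--     reference before it and the first reference at/after it."""
--     split = next((i for i, e in enumerate(all_files) if e == file), len(all_files))
--     before = next((e for e in reversed(all_files[:split]) if ref_str in e['type']), None)
--     after = next((e for e in all_files[split:] if ref_str in e['type']), None)
--     out = [] if before is None else [before]
--     return out if after is None else out + [after]
-- ===== Notes on version B (the rewrite author's own statement) =====
-- stated objective: alternative
-- what changed: Replaces A's one-pass state machine (flags i, j threaded through one loop) by a split-based decomposition: find the index of `file`, take the last reference in the prefix and the first reference in the suffix, and concatenate.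
import Mathlib
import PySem

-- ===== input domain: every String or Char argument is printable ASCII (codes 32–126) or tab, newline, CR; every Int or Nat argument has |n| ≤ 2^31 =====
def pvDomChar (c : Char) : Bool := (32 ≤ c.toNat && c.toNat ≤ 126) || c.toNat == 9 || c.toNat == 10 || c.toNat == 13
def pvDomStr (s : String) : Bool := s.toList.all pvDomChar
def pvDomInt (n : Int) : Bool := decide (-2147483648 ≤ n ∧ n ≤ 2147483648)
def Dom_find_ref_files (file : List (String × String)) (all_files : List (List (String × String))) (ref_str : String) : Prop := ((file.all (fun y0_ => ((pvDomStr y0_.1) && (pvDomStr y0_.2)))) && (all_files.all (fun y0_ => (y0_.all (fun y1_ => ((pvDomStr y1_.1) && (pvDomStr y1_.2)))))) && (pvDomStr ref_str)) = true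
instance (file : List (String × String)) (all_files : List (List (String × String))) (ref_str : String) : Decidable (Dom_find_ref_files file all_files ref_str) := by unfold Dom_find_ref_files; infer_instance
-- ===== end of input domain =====

-- ===== PORT A =====
-- shared primitives of both ports (Python semantics, not algorithm):
-- pyDictEq = Python's dict ==  (same keys, same values; order-insensitive);
-- pyIsRef  = `ref_str in element['type']` (the KeyError case, element without a
-- "type" key, is excluded by Pre_ below; there the port reads "" instead of raising)
def pyDictEq (a b : List (String × String)) : Bool :=
  a.all (fun p => b.lookup p.1 == some p.2) && b.all (fun p => a.lookup p.1 == some p.2)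

def pyIsRef (ref_str : String) (element : List (String × String)) : Bool :=
  PySem.Str.isIn ref_str ((element.lookup "type").getD "")

-- A's loop body, one step per element, state (i, j, ref_files)
def stepA (file : List (String × String)) (ref_str : String)
    (s : Int × Int × List (List (String × String))) (element : List (String × String)) :
    Int × Int × List (List (String × String)) :=
  let i : Int := if pyDictEq element file then 1 else s.1
  if pyIsRef ref_str element then
    let refs := if i == 0 then [element] else s.2.2
    if i == 1 && s.2.1 == 0 then (i, 1, refs ++ [element]) else (i, s.2.1, refs)
  else (i, s.2.1, s.2.2)

def find_ref_files (file : List (String × String)) (all_files : List (List (String × String))) (ref_str : String) : List (List (String × String)) :=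
  (all_files.foldl (stepA file ref_str) (0, 0, [])).2.2

-- ===== PORT B =====
-- Source B: split = first index of file (len if absent; findIdx is exactly that);
-- all_files[:split] / all_files[split:] = take/drop since 0 ≤ split ≤ len
def find_ref_files_alt (file : List (String × String)) (all_files : List (List (String × String))) (ref_str : String) : List (List (String × String)) :=
  let split := all_files.findIdx (fun e => pyDictEq e file)
  let before := ((all_files.take split).reverse).find? (pyIsRef ref_str)
  let after := (all_files.drop split).find? (pyIsRef ref_str)
  let out := match before with | none => [] | some b => [b]
  match after with | none => out | some a => out ++ [a]

-- ===== PRECONDITION & SPEC =====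
-- Pre_ excludes exactly the inputs on which Python A raises KeyError: some
-- element of all_files has no "type" key.
def Pre_find_ref_files (file : List (String × String)) (all_files : List (List (String × String))) (ref_str : String) : Prop :=
  ∀ e ∈ all_files, (e.lookup "type").isSome = true
instance (file : List (String × String)) (all_files : List (List (String × String))) (ref_str : String) : Decidable (Pre_find_ref_files file all_files ref_str) := by unfold Pre_find_ref_files; infer_instance

def pvWitness_find_ref_files : (List (String × String)) × (List (List (String × String))) × String :=
  ([("type", "hv")], [[("type", "ref1")], [("type", "hv")], [("type", "ref2")]], "ref")

-- ===== PRECONDITION & SPEC (spec) =====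
def Spec_find_ref_files (file : List (String × String)) (all_files : List (List (String × String))) (ref_str : String) (out : List (List (String × String))) : Prop := out = find_ref_files_alt file all_files ref_str
instance (file : List (String × String)) (all_files : List (List (String × String))) (ref_str : String) (out : List (List (String × String))) : Decidable (Spec_find_ref_files file all_files ref_str out) := by unfold Spec_find_ref_files; infer_instance

-- ===== CLAIM (what is proved, stated in full; the proofs are below) =====
def Claim_equal_find_ref_files : Prop := ∀ (file : List (String × String)) (all_files : List (List (String × String))) (ref_str : String), Dom_find_ref_files file all_files ref_str → Pre_find_ref_files file all_files ref_str → Spec_find_ref_files file all_files ref_str (find_ref_files file all_files ref_str)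

-- ===== LEMMAS AND PROOFS =====

-- once i = 1 and j = 1, the loop changes nothing
theorem foldl_stepA_frozen (file : List (String × String)) (ref_str : String)
    (l : List (List (String × String))) (refs : List (List (String × String))) :
    l.foldl (stepA file ref_str) (1, 1, refs) = (1, 1, refs) := by
  induction l with
  | nil => rfl
  | cons e l ih =>
      simp only [List.foldl_cons, stepA]
      cases h : pyDictEq e file <;> cases hr : pyIsRef ref_str e <;> simp [ih]

-- from state (1, 0, refs): the result is refs plus the first later reference
theorem foldl_stepA_after (file : List (String × String)) (ref_str : String)
    (l : List (List (String × String))) (refs : List (List (String × String))) :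
    (l.foldl (stepA file ref_str) (1, 0, refs)).2.2 =
      refs ++ (match l.find? (pyIsRef ref_str) with | none => [] | some a => [a]) := by
  induction l generalizing refs with
  | nil => simp
  | cons e l ih =>
      simp only [List.foldl_cons, stepA]
      cases h : pyDictEq e file <;> cases hr : pyIsRef ref_str e <;>
        simp [hr, ih, foldl_stepA_frozen]

-- main invariant: from state (0, 0, refs) the fold computes B's split formula,
-- with refs as the default when no earlier reference exists
theorem foldl_stepA_main (file : List (String × String)) (ref_str : String)
    (l : List (List (String × String))) (refs : List (List (String × String))) :
    (l.foldl (stepA file ref_str) (0, 0, refs)).2.2 =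
      (match ((l.take (l.findIdx (fun e => pyDictEq e file))).reverse).find? (pyIsRef ref_str) with
        | none => refs | some b => [b]) ++
      (match (l.drop (l.findIdx (fun e => pyDictEq e file))).find? (pyIsRef ref_str) with
        | none => [] | some a => [a]) := by
  induction l generalizing refs with
  | nil => simp
  | cons e l ih =>
      simp only [List.foldl_cons, List.findIdx_cons]
      cases h : pyDictEq e file with
      | true =>
          cases hr : pyIsRef ref_str e <;>
            simp [stepA, h, hr, foldl_stepA_frozen, foldl_stepA_after]
      | false =>
          have hstep : stepA file ref_str (0, 0, refs) e =
              (0, 0, if pyIsRef ref_str e then [e] else refs) := by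
            cases hr : pyIsRef ref_str e <;> simp [stepA, h, hr]
          rw [hstep]
          cases hr : pyIsRef ref_str e with
          | true =>
              rw [if_pos rfl, ih]
              simp only [List.take_succ_cons, List.drop_succ_cons, List.reverse_cons,
                List.find?_append, List.find?_cons, hr, Option.or_some, cond_false]
              cases hb : (List.take (List.findIdx (fun e => pyDictEq e file) l) l).reverse.find? (pyIsRef ref_str) <;> simp
          | false =>
              rw [if_neg (by simp), ih]
              simp [List.take_succ_cons, List.drop_succ_cons, List.find?_append, hr]

-- ===== VERDICT (by name: the statement is the Claim_ definition above) =====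
theorem find_ref_files_spec : Claim_equal_find_ref_files := by
  intro file all_files ref_str _ _
  unfold Spec_find_ref_files find_ref_files find_ref_files_alt
  rw [foldl_stepA_main]
  cases hb : (List.take (List.findIdx (fun e => pyDictEq e file) all_files) all_files).reverse.find? (pyIsRef ref_str) <;>
    cases ha : (List.drop (List.findIdx (fun e => pyDictEq e file) all_files) all_files).find? (pyIsRef ref_str) <;> simp [hb, ha]
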